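-- pv_equiv track=rewrite | github.com/kaluginpeter/Algorithms_and_structures_tasks | CodeWars/6kyu/Pig_Sursurunga.py | sursurungal
-- ===== SOURCE A (Python) =====
-- def sursurungal(txt):
--     words: list[str] = []
--     cur_sep: str = ''
--     prev_i: int = 0
--     i: int = 0
--     while i < len(txt):
--         if txt[i] == ' ':
--             if i - prev_i: words.append(txt[prev_i:i])
--             cur_sep += txt[i]
--             i += 1
--             prev_i = i
--         elif txt[i] == '\n':
--             if i - prev_i: words.append(txt[prev_i:i])
--             i += 1
--             prev_i = i
--             cur_sep += '\n'
--         else: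
--             if cur_sep: words.append(cur_sep)
--             cur_sep = ''
--             i += 1
--     if cur_sep:
--         words.append(cur_sep)
--     if prev_i != len(txt):
--         words.append(txt[prev_i:len(txt)])
--
--     for i in range(len(words)):
--         if not words[i].isdigit(): continue
--         number: int = int(words[i])
--         if number <= 1: continue
--         word: str = words[i + 2]
--         if number == 2:
--             if word.endswith('s'):
--                 words[i + 2] = "bu" + word[:-1]
--             else:
--                 words[i + 2] = "bu" + word
--         elif number <= 9:
--             if word.endswith('s'):
--                 words[i + 2] = word[:-1] + "zo"
--             else:
--                 words[i + 2] = word + "zo"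
--         else:
--             if word.endswith('s'):
--                 words[i + 2] = "ga" + word[:-1] + "ga"
--             else:
--                 words[i + 2] = "ga" + word + "ga"
--
--     return ''.join(words)
-- ===== SOURCE B (Python) =====
-- def _plural(n, word):
--     if word.endswith('s'):
--         word = word[:-1]
--     if n == 2:
--         return 'bu' + word
--     if n <= 9:
--         return word + 'zo'
--     return 'ga' + word + 'ga'
--
--
-- def sursurungal(txt):
--     # single pass: group maximal runs of {' ', '\n'} vs other chars,
--     # carry the pending number that pluralizes the next word
--     parts = []
--     pending = 0
--     i, n = 0, len(txt)
--     while i < n: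
--         is_sep = txt[i] in ' \n'
--         j = i + 1
--         while j < n and (txt[j] in ' \n') == is_sep:
--             j += 1
--         tok = txt[i:j]
--         i = j
--         if is_sep:
--             parts.append(tok)
--         elif pending:
--             parts.append(_plural(pending, tok))
--             pending = 0
--         else:
--             if tok.isdigit() and int(tok) > 1:
--                 pending = int(tok)
--             parts.append(tok)
--     return ''.join(parts)
-- ===== Notes on version B (the rewrite author's own statement) =====
-- stated objective: simpler
-- what changed: A builds a token list with a manual per-character scan and then pluralizes in a second indexed pass that mutates the token two slots after each number; B makes a single pass that groups maximal space/newline runs and carries the pending number in an accumulator, emitting the output as it goes.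
import Mathlib
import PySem

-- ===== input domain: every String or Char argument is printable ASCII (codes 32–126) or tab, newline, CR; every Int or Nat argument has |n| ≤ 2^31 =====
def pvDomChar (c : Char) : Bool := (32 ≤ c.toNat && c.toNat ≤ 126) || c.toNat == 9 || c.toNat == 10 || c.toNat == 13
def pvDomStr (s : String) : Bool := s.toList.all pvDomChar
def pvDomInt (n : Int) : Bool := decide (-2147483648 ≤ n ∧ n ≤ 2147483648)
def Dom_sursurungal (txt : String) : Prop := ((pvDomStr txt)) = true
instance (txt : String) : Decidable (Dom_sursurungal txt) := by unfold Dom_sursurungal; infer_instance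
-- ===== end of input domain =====

-- B replaces A's two-phase algorithm (manual char scan building a token list, then a second
-- indexed pass mutating the token two slots after each number) by a single pass that groups
-- maximal separator/word runs and carries the pending number; objective: simpler.


-- ===== PORT A =====
-- Phase 1 of A: the 'while i < len(txt)' scan building (words, prev_i, cur_sep).
-- fuel only makes the recursion structural; with fuel ≥ len(txt) - i it never runs out.
def sursurungalLoop (s : List Char) : Nat → Nat → Nat → List Char → List (List Char) →
    List (List Char) × Nat × List Char
  | 0, _, prevI, curSep, words => (words, prevI, curSep)
  | fuel + 1, i, prevI, curSep, words =>
    if h : i < s.length then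
      if s[i] = ' ' then
        sursurungalLoop s fuel (i+1) (i+1) (curSep ++ [' '])
          (if i - prevI ≠ 0 then words ++ [PySem.List.slice s (some (prevI : Int)) (some (i : Int))] else words)
      else if s[i] = '\n' then
        sursurungalLoop s fuel (i+1) (i+1) (curSep ++ ['\n'])
          (if i - prevI ≠ 0 then words ++ [PySem.List.slice s (some (prevI : Int)) (some (i : Int))] else words)
      else
        sursurungalLoop s fuel (i+1) prevI [] (if curSep ≠ [] then words ++ [curSep] else words)
    else (words, prevI, curSep)

-- Body of A's 'for i in range(len(words))' pass (words[i+2] read/written via pyGetD/pySetD;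
-- the out-of-range case, Python's IndexError, is excluded by Pre_ below).
def sursurungalStep (ws : List (List Char)) (i : Int) : List (List Char) :=
  if ¬ (PySem.Chars.strIsdigit (PySem.List.pyGetD ws i []) = true) then ws
  else
    let number : Int := (PySem.Int.ofChars? (PySem.List.pyGetD ws i [])).getD 0
    if number ≤ 1 then ws
    else
      let word := PySem.List.pyGetD ws (i + 2) []
      if number = 2 then
        if PySem.Chars.endswith word ['s'] = true then
          PySem.List.pySetD ws (i+2) (['b','u'] ++ PySem.List.slice word none (some (-1)))
        else PySem.List.pySetD ws (i+2) (['b','u'] ++ word)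
      else if number ≤ 9 then
        if PySem.Chars.endswith word ['s'] = true then
          PySem.List.pySetD ws (i+2) (PySem.List.slice word none (some (-1)) ++ ['z','o'])
        else PySem.List.pySetD ws (i+2) (word ++ ['z','o'])
      else
        if PySem.Chars.endswith word ['s'] = true then
          PySem.List.pySetD ws (i+2) (['g','a'] ++ PySem.List.slice word none (some (-1)) ++ ['g','a'])
        else PySem.List.pySetD ws (i+2) (['g','a'] ++ word ++ ['g','a'])

def sursurungal (txt : String) : String :=
  let s := txt.toList
  let r := sursurungalLoop s s.length 0 0 [] []
  let words := if r.2.2 ≠ [] then r.1 ++ [r.2.2] else r.1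
  let words := if r.2.1 ≠ s.length then
      words ++ [PySem.List.slice s (some (r.2.1 : Int)) (some (s.length : Int))] else words
  let words := (PySem.List.pyRange 0 (PySem.List.len words) 1).foldl sursurungalStep words
  String.ofList (PySem.Chars.join [] words)

-- ===== PORT B =====
-- Python: c in ' \n'
def pvIsSepChar (c : Char) : Bool := PySem.Chars.isIn [c] [' ', '\n']

-- B's inner 'while j < n and (txt[j] in SEP) == is_sep: j += 1' (fuel as above)
def sursurungalRun (s : List Char) : Nat → Nat → Bool → Nat
  | 0, j, _ => j
  | fuel + 1, j, isSep =>
    if h : j < s.length then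
      if pvIsSepChar s[j] == isSep then sursurungalRun s fuel (j+1) isSep else j
    else j

-- B's _plural helper
def pvPlural (n : Int) (word : List Char) : List Char :=
  let w := if PySem.Chars.endswith word ['s'] = true
           then PySem.List.slice word none (some (-1)) else word
  if n = 2 then ['b','u'] ++ w
  else if n ≤ 9 then w ++ ['z','o']
  else ['g','a'] ++ w ++ ['g','a']

-- B's outer loop: one token (maximal run) per iteration, pending number carried along.
def sursurungalAltLoop (s : List Char) : Nat → Nat → Int → List (List Char) → List (List Char)
  | 0, _, _, parts => parts
  | fuel + 1, i, pending, parts =>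
    if h : i < s.length then
      let isSep := pvIsSepChar s[i]
      let j := sursurungalRun s s.length (i+1) isSep
      let tok := PySem.List.slice s (some (i : Int)) (some (j : Int))
      if isSep then sursurungalAltLoop s fuel j pending (parts ++ [tok])
      else if pending ≠ 0 then sursurungalAltLoop s fuel j 0 (parts ++ [pvPlural pending tok])
      else if PySem.Chars.strIsdigit tok = true ∧ 1 < (PySem.Int.ofChars? tok).getD 0 then
        sursurungalAltLoop s fuel j ((PySem.Int.ofChars? tok).getD 0) (parts ++ [tok])
      else sursurungalAltLoop s fuel j pending (parts ++ [tok])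
    else parts

def sursurungal_alt (txt : String) : String :=
  String.ofList (PySem.Chars.join []
    (sursurungalAltLoop txt.toList txt.toList.length 0 0 []))

-- ===== PRECONDITION & SPEC =====
def pvSep (c : Char) : Bool := c == ' ' || c == '\n'

-- the maximal word tokens (runs of non-separator characters) of the text, in order
-- (acc carries the current word, reversed)
def pvWordsAux : List Char → List Char → List (List Char)
  | [], acc => if acc = [] then [] else [acc.reverse]
  | c :: t, acc =>
    if pvSep c then (if acc = [] then pvWordsAux t [] else acc.reverse :: pvWordsAux t [])
    else pvWordsAux t (c :: acc)

def pvWords (s : List Char) : List (List Char) := pvWordsAux s []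

def pvIsNum (t : List Char) : Bool :=
  PySem.Chars.strIsdigit t && decide (1 < (PySem.Int.ofChars? t).getD 0)

-- Pre_ excludes exactly the inputs where A raises IndexError (words[i+2] past the end):
-- texts whose word tokens end with an odd-length run of all-digit words with value > 1.
def Pre_sursurungal (txt : String) : Prop :=
  ((pvWords txt.toList).reverse.takeWhile pvIsNum).length % 2 = 0
instance (txt : String) : Decidable (Pre_sursurungal txt) := by
  unfold Pre_sursurungal; infer_instance

def pvWitness_sursurungal : String := "2 apples"

def Spec_sursurungal (txt : String) (out : String) : Prop := out = sursurungal_alt txt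
instance (txt : String) (out : String) : Decidable (Spec_sursurungal txt out) := by
  unfold Spec_sursurungal; infer_instance

-- ===== CLAIM (what is proved, stated in full; the proofs are below) =====
def Claim_equal_sursurungal : Prop :=
  ∀ (txt : String), Dom_sursurungal txt → Pre_sursurungal txt →
    Spec_sursurungal txt (sursurungal txt)

-- ===== LEMMAS AND PROOFS =====

-- reference tokenization: maximal runs of same separator-class characters
def pvRuns (s : List Char) : List (List Char) :=
  match s with
  | [] => []
  | c :: t =>
    (c :: t.takeWhile (fun d => pvSep d == pvSep c)) ::
      pvRuns (t.dropWhile (fun d => pvSep d == pvSep c))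
termination_by s.length
decreasing_by
  have := List.length_dropWhile_le (fun d => pvSep d == pvSep c) t
  simp; omega

-- merge a pending separator run into the runs of the rest
def pvMergeSep (cs : List Char) (rs : List (List Char)) : List (List Char) :=
  if cs = [] then rs
  else match rs with
    | [] => [cs]
    | r :: rest => if pvSep r.headI then (cs ++ r) :: rest else cs :: r :: rest

-- A's finalization after the phase-1 loop
def pvFinalize (s : List Char) (r : List (List Char) × Nat × List Char) : List (List Char) :=
  let words := if r.2.2 ≠ [] then r.1 ++ [r.2.2] else r.1
  if r.2.1 ≠ s.length then
    words ++ [PySem.List.slice s (some (r.2.1 : Int)) (some (s.length : Int))] else words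

-- reference single pass over tokens (what B computes per token)
def pvProc : List (List Char) → Int → List (List Char) → List (List Char)
  | [], _, parts => parts
  | t :: ts, pending, parts =>
    if pvSep t.headI then pvProc ts pending (parts ++ [t])
    else if pending ≠ 0 then pvProc ts 0 (parts ++ [pvPlural pending t])
    else if pvIsNum t then pvProc ts ((PySem.Int.ofChars? t).getD 0) (parts ++ [t])
    else pvProc ts pending (parts ++ [t])

-- does a pending number survive past the end (= A raises)?
def pvPend : List (List Char) → Bool → Bool
  | [], p => p
  | t :: ts, p =>
    if pvSep t.headI then pvPend ts p
    else if p then pvPend ts false else pvPend ts (pvIsNum t)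

def pvUniform (t : List Char) : Prop := t ≠ [] ∧ ∀ c ∈ t, pvSep c = pvSep t.headI

-- ---- small facts ----

theorem drop_takeWhile_length (l : List Char) (p : Char → Bool) :
    l.drop ((l.takeWhile p).length) = l.dropWhile p := by
  nth_rewrite 2 [show l = l.takeWhile p ++ l.dropWhile p from (List.takeWhile_append_dropWhile).symm]
  rw [List.drop_left' rfl]

theorem dropWhile_head_false (p : Char → Bool) (l ds : List Char) (d : Char)
    (h : l.dropWhile p = d :: ds) : p d = false := by
  induction l with
  | nil => simp at h
  | cons a t ih =>
    rw [List.dropWhile_cons] at h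
    by_cases hp : p a = true
    · rw [if_pos hp] at h; exact ih h
    · rw [if_neg hp] at h; cases h; simpa using hp

theorem pvIsSepChar_eq : pvIsSepChar = pvSep := by
  funext c
  by_cases h1 : c = ' '
  · subst h1; decide
  by_cases h2 : c = '\n'
  · subst h2; decide
  have hf : PySem.Chars.isIn [c] [' ', '\n'] = false := by
    rw [PySem.Chars.isIn_eq_false_iff]
    intro h
    have hm := List.singleton_sublist.mp h.sublist
    simp at hm
    rcases hm with h | h <;> simp_all
  simp [pvIsSepChar, pvSep, hf, h1, h2]

theorem pvSep_head_of_digit (t : List Char) (h : PySem.Chars.strIsdigit t = true) :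
    pvSep t.headI = false := by
  cases t with
  | nil => simp [PySem.Chars.strIsdigit] at h
  | cons c t' =>
    simp [PySem.Chars.strIsdigit] at h
    have hc : PySem.Chars.isdigit c = true := h.1
    simp only [List.headI_cons, pvSep]
    by_cases h1 : c = ' '
    · subst h1; simp [PySem.Chars.isdigit] at hc
    by_cases h2 : c = '\n'
    · subst h2; simp [PySem.Chars.isdigit] at hc
    simp [h1, h2]

theorem not_digit_of_sep (t : List Char) (hs : pvSep t.headI = true) :
    PySem.Chars.strIsdigit t = false := by
  cases hd : PySem.Chars.strIsdigit t
  · rfl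
  · exact absurd (pvSep_head_of_digit t hd) (by simp [hs])

theorem plural_not_digit (n : Int) (w : List Char) :
    PySem.Chars.strIsdigit (pvPlural n w) = false := by
  unfold pvPlural
  split_ifs <;> simp [PySem.Chars.strIsdigit, PySem.Chars.isdigit]

-- ---- runs facts ----

theorem pvRuns_uniform_append (w t : List Char) (b : Bool) (hw : w ≠ [])
    (hall : ∀ c ∈ w, pvSep c = b)
    (ht : ∀ d, t.head? = some d → pvSep d = !b) :
    pvRuns (w ++ t) = w :: pvRuns t := by
  cases w with
  | nil => simp at hw
  | cons c w' =>
    have hc : pvSep c = b := hall c (by simp)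
    have hw' : ∀ x ∈ w', (fun d => pvSep d == pvSep c) x = true := by
      intro x hx
      simp [hall x (by simp [hx]), hc]
    have htt : t.takeWhile (fun d => pvSep d == pvSep c) = [] := by
      cases t with
      | nil => rfl
      | cons d t' =>
        have hd := ht d rfl
        rw [List.takeWhile_cons]
        simp [hd, hc]
    have htd : t.dropWhile (fun d => pvSep d == pvSep c) = t := by
      cases t with
      | nil => rfl
      | cons d t' =>
        have hd := ht d rfl
        rw [List.dropWhile_cons]
        simp [hd, hc]
    rw [List.cons_append]
    simp only [pvRuns]
    rw [List.takeWhile_append_of_pos hw', List.dropWhile_append_of_pos hw', htt, htd]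
    simp

theorem pvRuns_uniform (w : List Char) (b : Bool) (hw : w ≠ []) (hall : ∀ c ∈ w, pvSep c = b) :
    pvRuns w = [w] := by
  have h := pvRuns_uniform_append w [] b hw hall (by simp)
  simpa [pvRuns] using h

theorem pvMergeSep_shift (cs : List Char) (c : Char) (t : List Char) (hc : pvSep c = true) :
    pvMergeSep (cs ++ [c]) (pvRuns t) = pvMergeSep cs (pvRuns (c :: t)) := by
  cases t with
  | nil => by_cases h : cs = [] <;> simp [pvRuns, pvMergeSep, h, hc]
  | cons d t' =>
    by_cases hd : pvSep d = true
    · have hpred : (fun e => pvSep e == pvSep d) = (fun e => pvSep e == pvSep c) := by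
        funext e; rw [hd, hc]
      simp only [pvRuns, List.takeWhile_cons, List.dropWhile_cons, hpred]
      by_cases hcs : cs = [] <;> simp [pvMergeSep, hd, hc, hcs]
    · have hdf : pvSep d = false := by simpa using hd
      simp only [pvRuns, List.takeWhile_cons, List.dropWhile_cons]
      rw [hdf, hc]
      by_cases hcs : cs = [] <;> simp [pvMergeSep, pvRuns, hdf, hc, hcs]

theorem pvRuns_forall_uniform (s : List Char) : ∀ t ∈ pvRuns s, pvUniform t := by
  induction hn : s.length using Nat.strong_induction_on generalizing s with
  | _ n ih =>
    cases s with
    | nil => simp [pvRuns]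
    | cons c t =>
      subst hn
      simp only [pvRuns, List.mem_cons]
      rintro r (rfl | hr)
      · refine ⟨by simp, ?_⟩
        intro x hx
        rcases List.mem_cons.mp hx with rfl | hx'
        · rfl
        · have hp := List.mem_takeWhile_imp hx'
          simp only [List.headI_cons]
          simpa using hp
      · exact ih _ (by have := List.length_dropWhile_le (fun d => pvSep d == pvSep c) t; simp; omega)
          _ rfl r hr

theorem pvRuns_chain (s : List Char) :
    (pvRuns s).IsChain (fun a b => pvSep a.headI ≠ pvSep b.headI) := by
  induction hn : s.length using Nat.strong_induction_on generalizing s with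
  | _ n ih =>
    cases s with
    | nil => simp [pvRuns]
    | cons c t =>
      subst hn
      simp only [pvRuns]
      have hch := ih (t.dropWhile (fun d => pvSep d == pvSep c)).length
        (by have := List.length_dropWhile_le (fun d => pvSep d == pvSep c) t; simp; omega)
        (t.dropWhile (fun d => pvSep d == pvSep c)) rfl
      cases hrest : t.dropWhile (fun d => pvSep d == pvSep c) with
      | nil => simp [pvRuns]
      | cons d t' =>
        rw [hrest] at hch
        simp only [pvRuns] at hch ⊢
        rw [List.isChain_cons_cons]
        refine ⟨?_, hch⟩
        have hd := dropWhile_head_false _ _ _ _ hrest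
        simp only [List.headI_cons]
        have hd' : pvSep d ≠ pvSep c := by simpa using hd
        exact fun hh => hd' hh.symm

-- ---- phase 1 of A = pvRuns ----

theorem loopA_base (s : List Char) (prevI : Nat) (curSep : List Char) (words : List (List Char))
    (hp : prevI ≤ s.length)
    (hnon : ∀ c ∈ (s.drop prevI).take (s.length - prevI), pvSep c = false)
    (hcs : curSep ≠ [] → prevI = s.length) :
    pvFinalize s (words, prevI, curSep)
      = words ++ (if curSep = [] then pvRuns (s.drop prevI)
                  else pvMergeSep curSep (pvRuns (s.drop s.length))) := by
  by_cases hc : curSep = []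
  · subst hc
    rw [if_pos rfl]
    by_cases hpl : prevI = s.length
    · simp [pvFinalize, hpl, List.drop_length, pvRuns]
    · have hne : s.drop prevI ≠ [] := by
        simp only [ne_eq, List.drop_eq_nil_iff]
        omega
      have htk : (s.drop prevI).take (s.length - prevI) = s.drop prevI :=
        List.take_of_length_le (by simp)
      rw [pvRuns_uniform (s.drop prevI) false hne (by rw [htk] at hnon; exact hnon)]
      simp [pvFinalize, hpl, PySem.List.slice_natCast, htk]
  · have hpl := hcs hc
    subst hpl
    simp [pvFinalize, hc, List.drop_length, pvRuns, pvMergeSep]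

theorem loopA_spec (s : List Char) : ∀ (fuel i prevI : Nat) (curSep : List Char)
    (words : List (List Char)),
    s.length - i ≤ fuel → prevI ≤ i → i ≤ s.length →
    (∀ c ∈ (s.drop prevI).take (i - prevI), pvSep c = false) →
    (∀ c ∈ curSep, pvSep c = true) →
    (curSep ≠ [] → prevI = i) →
    pvFinalize s (sursurungalLoop s fuel i prevI curSep words)
      = words ++ (if curSep = [] then pvRuns (s.drop prevI)
                  else pvMergeSep curSep (pvRuns (s.drop i))) := by
  intro fuel
  induction fuel with
  | zero =>
    intro i prevI curSep words hfuel hpi hil hnon hsep hinv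
    have hi : i = s.length := by omega
    subst hi
    exact loopA_base s prevI curSep words (by omega) hnon hinv
  | succ fuel ih =>
    intro i prevI curSep words hfuel hpi hil hnon hsep hinv
    simp only [sursurungalLoop]
    by_cases h : i < s.length
    case neg =>
      rw [dif_neg h]
      have hi : i = s.length := by omega
      subst hi
      exact loopA_base s prevI curSep words (by omega) hnon hinv
    rw [dif_pos h]
    have key : ∀ (c0 : Char), pvSep c0 = true → s[i] = c0 →
        pvFinalize s (sursurungalLoop s fuel (i+1) (i+1) (curSep ++ [c0])
          (if i - prevI ≠ 0 then
              words ++ [PySem.List.slice s (some (prevI : Int)) (some (i : Int))] else words))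
          = words ++ (if curSep = [] then pvRuns (s.drop prevI)
                      else pvMergeSep curSep (pvRuns (s.drop i))) := by
      intro c0 hc0 hci
      have hdi : c0 :: s.drop (i+1) = s.drop i := by
        rw [← hci]
        exact (List.drop_eq_getElem_cons h).symm
      rw [ih (i+1) (i+1) (curSep ++ [c0]) _ (by omega) (by omega) (by omega)
          (by simp)
          (by intro x hx
              rcases List.mem_append.mp hx with hx | hx
              · exact hsep x hx
              · simp at hx; rw [hx]; exact hc0)
          (fun _ => rfl)]
      rw [if_neg (show ¬ (curSep ++ [c0] = []) from by simp)]
      rw [pvMergeSep_shift curSep c0 (s.drop (i+1)) hc0, hdi]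
      by_cases hcs : curSep = []
      · subst hcs
        rw [show pvMergeSep ([] : List Char) (pvRuns (s.drop i)) = pvRuns (s.drop i) from by
              simp [pvMergeSep]]
        rw [if_pos rfl]
        by_cases hpv : i - prevI ≠ 0
        · rw [if_pos hpv, PySem.List.slice_natCast]
          have hsplit : s.drop prevI = (s.drop prevI).take (i - prevI) ++ s.drop i := by
            conv_lhs => rw [← List.take_append_drop (i - prevI) (s.drop prevI)]
            rw [List.drop_drop, show prevI + (i - prevI) = i from by omega]
          have hwne : (s.drop prevI).take (i - prevI) ≠ [] := by
            simp only [ne_eq, List.take_eq_nil_iff, List.drop_eq_nil_iff]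
            omega
          conv_rhs => rw [hsplit]
          rw [pvRuns_uniform_append _ _ false hwne hnon
              (by intro d hd
                  rw [← hdi] at hd
                  simp at hd
                  rw [← hd, hc0]
                  rfl)]
          simp
        · rw [if_neg hpv, show prevI = i from by omega]
      · rw [if_neg (show ¬ (i - prevI ≠ 0) from by
              have := hinv hcs; omega)]
        rw [if_neg hcs]
    by_cases hsp : s[i] = ' '
    · rw [if_pos hsp]
      exact key ' ' (by decide) hsp
    rw [if_neg hsp]
    by_cases hnl : s[i] = '\n'
    · rw [if_pos hnl]
      exact key '\n' (by decide) hnl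
    rw [if_neg hnl]
    have hw : pvSep s[i] = false := by simp [pvSep, hsp, hnl]
    have hnon' : ∀ c ∈ (s.drop prevI).take (i + 1 - prevI), pvSep c = false := by
      intro x hx
      have hstep : (s.drop prevI).take (i + 1 - prevI)
          = (s.drop prevI).take (i - prevI) ++ [s[i]] := by
        rw [show i + 1 - prevI = (i - prevI) + 1 from by omega, List.take_add_one]
        congr 1
        rw [List.getElem?_drop, show prevI + (i - prevI) = i from by omega,
            List.getElem?_eq_getElem h]
        rfl
      rw [hstep] at hx
      rcases List.mem_append.mp hx with hx | hx
      · exact hnon x hx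
      · simp at hx; rw [hx]; exact hw
    rw [ih (i+1) prevI [] _ (by omega) (by omega) (by omega) hnon' (by simp) (by simp)]
    by_cases hcs : curSep = []
    · subst hcs
      simp
    · rw [if_pos hcs, if_pos rfl, if_neg hcs]
      have hpe := hinv hcs
      rw [hpe]
      conv_rhs => rw [List.drop_eq_getElem_cons h]
      rw [show pvMergeSep curSep (pvRuns (s[i] :: s.drop (i+1)))
            = curSep :: pvRuns (s[i] :: s.drop (i+1)) from by
            simp only [pvRuns]
            simp [pvMergeSep, hcs, hw]]
      rw [← List.drop_eq_getElem_cons h]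
      simp

-- ---- B's loop = pvProc over pvRuns ----

theorem runB_spec (s : List Char) : ∀ (fuel j : Nat) (b : Bool), s.length - j ≤ fuel →
    sursurungalRun s fuel j b
      = j + ((s.drop j).takeWhile (fun d => pvIsSepChar d == b)).length := by
  intro fuel
  induction fuel with
  | zero =>
    intro j b hf
    have : s.drop j = [] := List.drop_of_length_le (by omega)
    simp [sursurungalRun, this]
  | succ fuel ih =>
    intro j b hf
    simp only [sursurungalRun]
    by_cases h : j < s.length
    · rw [dif_pos h, List.drop_eq_getElem_cons h, List.takeWhile_cons]
      by_cases hp : pvIsSepChar s[j] == b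
      · rw [if_pos hp, hp, ih (j+1) b (by omega)]
        simp
        omega
      · rw [if_neg hp]
        simp at hp
        simp [hp]
    · rw [dif_neg h]
      have : s.drop j = [] := List.drop_of_length_le (by omega)
      simp [this]

theorem pvProc_acc (ts : List (List Char)) : ∀ (pending : Int) (parts : List (List Char)),
    pvProc ts pending parts = parts ++ pvProc ts pending [] := by
  induction ts with
  | nil => intro pending parts; simp [pvProc]
  | cons t ts ih =>
    intro pending parts
    simp only [pvProc]
    split_ifs with h1 h2 h3 <;>
      rw [ih _ (parts ++ [_]), ih _ ([] ++ [_])] <;> simp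

theorem loopB_spec (s : List Char) : ∀ (fuel i : Nat) (pending : Int) (parts : List (List Char)),
    s.length - i ≤ fuel →
    sursurungalAltLoop s fuel i pending parts
      = parts ++ pvProc (pvRuns (s.drop i)) pending [] := by
  intro fuel
  induction fuel with
  | zero =>
    intro i pending parts hf
    have : s.drop i = [] := List.drop_of_length_le (by omega)
    simp [sursurungalAltLoop, this, pvRuns, pvProc]
  | succ fuel ih =>
    intro i pending parts hf
    simp only [sursurungalAltLoop]
    by_cases h : i < s.length
    case neg =>
      rw [dif_neg h]
      have : s.drop i = [] := List.drop_of_length_le (by omega)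
      simp [this, pvRuns, pvProc]
    rw [dif_pos h]
    -- name the pieces
    have hrun : sursurungalRun s s.length (i+1) (pvIsSepChar s[i])
        = (i+1) + ((s.drop (i+1)).takeWhile (fun d => pvIsSepChar d == pvIsSepChar s[i])).length := by
      exact runB_spec s s.length (i+1) _ (by omega)
    have hpred : (fun d => pvIsSepChar d == pvIsSepChar s[i])
        = (fun d => pvSep d == pvSep s[i]) := by
      rw [pvIsSepChar_eq]
    set tw := (s.drop (i+1)).takeWhile (fun d => pvSep d == pvSep s[i]) with htw
    have hrun' : sursurungalRun s s.length (i+1) (pvIsSepChar s[i]) = (i+1) + tw.length := by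
      rw [hrun, hpred]
    have hdi : s.drop i = s[i] :: s.drop (i+1) := List.drop_eq_getElem_cons h
    have htok : PySem.List.slice s (some (i : Int))
        (some (((i+1) + tw.length : Nat) : Int)) = s[i] :: tw := by
      rw [PySem.List.slice_natCast, show (i+1) + tw.length - i = tw.length + 1 from by omega]
      rw [hdi, List.take_succ_cons]
      congr 1
      exact (List.prefix_iff_eq_take.mp (List.takeWhile_prefix _)).symm
    have hdrop : s.drop ((i+1) + tw.length) = (s.drop (i+1)).dropWhile (fun d => pvSep d == pvSep s[i]) := by
      have hsw : List.drop (i+1+tw.length) s = List.drop tw.length (List.drop (i+1) s) := by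
        rw [List.drop_drop]
      rw [hsw, htw]
      exact drop_takeWhile_length _ _
    have hruns : pvRuns (s.drop i) = (s[i] :: tw) :: pvRuns (s.drop ((i+1) + tw.length)) := by
      rw [hdi, hdrop]
      simp only [pvRuns]
      rw [← htw]
    have hlen : s.length - ((i+1) + tw.length) ≤ fuel := by omega
    rw [hrun']
    rw [htok]
    rw [hruns]
    simp only [pvProc, List.headI_cons]
    by_cases hsep : pvIsSepChar s[i]
    · rw [if_pos hsep]
      have hsep' : pvSep s[i] = true := by rw [← pvIsSepChar_eq]; exact hsep
      rw [if_pos hsep']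
      rw [ih _ pending (parts ++ [s[i] :: tw]) hlen, pvProc_acc _ pending ([] ++ [s[i] :: tw])]
      simp
    · rw [if_neg hsep]
      have hsep' : ¬ (pvSep s[i] = true) := by rw [← pvIsSepChar_eq]; simpa using hsep
      rw [if_neg hsep']
      by_cases hp : pending ≠ 0
      · rw [if_pos hp, if_pos hp]
        rw [ih _ 0 _ hlen, pvProc_acc _ 0 ([] ++ [_])]
        simp
      · rw [if_neg hp, if_neg hp]
        by_cases hnum : PySem.Chars.strIsdigit (s[i] :: tw) = true ∧ 1 < (PySem.Int.ofChars? (s[i] :: tw)).getD 0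
        · rw [if_pos hnum, if_pos (show pvIsNum (s[i] :: tw) = true from by
              simp [pvIsNum, hnum.1, hnum.2])]
          rw [ih _ _ _ hlen, pvProc_acc _ _ ([] ++ [_])]
          simp
        · rw [if_neg hnum, if_neg (show ¬ pvIsNum (s[i] :: tw) = true from by
              simp only [pvIsNum, Bool.and_eq_true, decide_eq_true_eq]
              exact fun hc => hnum ⟨hc.1, hc.2⟩)]
          rw [ih _ _ _ hlen, pvProc_acc _ _ ([] ++ [_])]
          simp

-- ---- phase 2 of A = pvProc under no-raise ----

theorem phase2_spec : ∀ (n : Nat) (rest done : List (List Char)), rest.length ≤ n →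
    (∀ t ∈ rest, pvUniform t) →
    rest.IsChain (fun a b => pvSep a.headI ≠ pvSep b.headI) →
    pvPend rest false = false →
    (PySem.List.pyRange (done.length : Int) ((done.length + rest.length : Nat) : Int) 1).foldl
        sursurungalStep (done ++ rest)
      = done ++ pvProc rest 0 [] := by
  intro n
  induction n using Nat.strong_induction_on with
  | _ n ih =>
    intro rest done hlen hu hch hpend
    cases rest with
    | nil =>
      rw [show ((done.length + ([] : List (List Char)).length : Nat) : Int) = (done.length : Int)
            from by simp]
      rw [PySem.List.pyRange_one_eq_nil (le_refl _)]
      simp [pvProc]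
    | cons t ts =>
      have hN : (done.length : Int) < ((done.length + (t :: ts).length : Nat) : Int) := by
        push_cast; simp
      rw [PySem.List.pyRange_one_cons hN, List.foldl_cons]
      have hget : PySem.List.pyGetD (done ++ t :: ts) (done.length : Int) [] = t := by
        rw [PySem.List.pyGetD_natCast]
        simp [List.getD]
      by_cases hnum : pvIsNum t = true
      case neg =>
        have hnum' : pvIsNum t = false := by simpa using hnum
        have hstep : sursurungalStep (done ++ t :: ts) (done.length : Int) = done ++ t :: ts := by
          simp only [sursurungalStep]
          rw [hget]
          by_cases hd : PySem.Chars.strIsdigit t = true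
          · rw [if_neg (by simp [hd])]
            have hval : (PySem.Int.ofChars? t).getD 0 ≤ 1 := by
              simp [pvIsNum, hd] at hnum'
              omega
            rw [if_pos hval]
          · rw [if_pos (by simp [hd])]
        rw [hstep]
        have hpend' : pvPend ts false = false := by
          simp only [pvPend] at hpend
          by_cases hsept : pvSep t.headI = true
          · simpa [hsept] using hpend
          · simp only [Bool.not_eq_true] at hsept
            simpa [hsept, hnum'] using hpend
        rw [show (done.length : Int) + 1 = (((done ++ [t]).length : Nat) : Int) from by
              simp,
            show ((done.length + (t :: ts).length : Nat) : Int)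
                = (((done ++ [t]).length + ts.length : Nat) : Int) from by
              push_cast; simp; omega,
            show done ++ t :: ts = (done ++ [t]) ++ ts from by simp]
        rw [ih ts.length (by simp at hlen; omega) ts (done ++ [t]) (le_refl _)
            (fun x hx => hu x (by simp [hx])) hch.of_cons hpend']
        have hproc : pvProc (t :: ts) 0 [] = [t] ++ pvProc ts 0 [] := by
          by_cases hsept : pvSep t.headI = true
          · calc pvProc (t :: ts) 0 [] = pvProc ts 0 ([] ++ [t]) := by simp [pvProc, hsept]
              _ = ([] ++ [t]) ++ pvProc ts 0 [] := pvProc_acc _ _ _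
              _ = [t] ++ pvProc ts 0 [] := by simp
          · calc pvProc (t :: ts) 0 [] = pvProc ts 0 ([] ++ [t]) := by
                  simp [pvProc, hsept, hnum']
              _ = ([] ++ [t]) ++ pvProc ts 0 [] := pvProc_acc _ _ _
              _ = [t] ++ pvProc ts 0 [] := by simp
        rw [hproc]
        simp
      case pos =>
        have hdig : PySem.Chars.strIsdigit t = true ∧ 1 < (PySem.Int.ofChars? t).getD 0 := by
          simpa [pvIsNum] using hnum
        have hth : pvSep t.headI = false := pvSep_head_of_digit t hdig.1
        obtain ⟨s1, t2, rest2, rfl⟩ : ∃ s1 t2 rest2, ts = s1 :: t2 :: rest2 := by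
          cases ts with
          | nil =>
            exfalso
            simp [pvPend, hth, hnum] at hpend
          | cons s1 ts2 =>
            have hs1 : pvSep s1.headI = true := by
              have hrel := (List.isChain_cons_cons.mp hch).1
              rw [hth] at hrel
              by_contra hb
              simp only [Bool.not_eq_true] at hb
              rw [hb] at hrel
              exact hrel rfl
            cases ts2 with
            | nil =>
              exfalso
              simp [pvPend, hth, hnum, hs1] at hpend
            | cons t2 rest2 => exact ⟨s1, t2, rest2, rfl⟩
        have hs1 : pvSep s1.headI = true := by
          have hrel := (List.isChain_cons_cons.mp hch).1
          rw [hth] at hrel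
          by_contra hb
          simp only [Bool.not_eq_true] at hb
          rw [hb] at hrel
          exact hrel rfl
        have ht2 : pvSep t2.headI = false := by
          have hrel := (List.isChain_cons_cons.mp hch.of_cons).1
          rw [hs1] at hrel
          by_contra hb
          simp only [Bool.not_eq_false] at hb
          rw [hb] at hrel
          exact hrel rfl
        set n0 := (PySem.Int.ofChars? t).getD 0 with hn0
        have hget2 : PySem.List.pyGetD (done ++ t :: s1 :: t2 :: rest2)
            ((done.length : Int) + 2) [] = t2 := by
          rw [show (done.length : Int) + 2 = ((done.length + 2 : Nat) : Int) from by push_cast; ring]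
          rw [PySem.List.pyGetD_natCast]
          simp [List.getD]
        have hset : ∀ v, PySem.List.pySetD (done ++ t :: s1 :: t2 :: rest2)
            ((done.length : Int) + 2) v = done ++ t :: s1 :: v :: rest2 := by
          intro v
          rw [show (done.length : Int) + 2 = ((done.length + 2 : Nat) : Int) from by push_cast; ring]
          rw [PySem.List.pySetD_natCast]
          rw [List.set_append_right _ _ (by omega)]
          simp
        have hstep1 : sursurungalStep (done ++ t :: s1 :: t2 :: rest2) (done.length : Int)
            = done ++ t :: s1 :: pvPlural n0 t2 :: rest2 := by
          simp only [sursurungalStep]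
          rw [hget, hget2]
          rw [if_neg (by simp [hdig.1])]
          rw [if_neg (show ¬ ((PySem.Int.ofChars? t).getD 0 ≤ 1) from by rw [← hn0]; omega)]
          by_cases h2 : (PySem.Int.ofChars? t).getD 0 = 2
          · rw [if_pos h2]
            by_cases hes : PySem.Chars.endswith t2 ['s'] = true
            · rw [if_pos hes, hset]
              simp [pvPlural, hes, hn0, h2]
            · rw [if_neg hes, hset]
              simp [pvPlural, hes, hn0, h2]
          · rw [if_neg h2]
            by_cases h9 : (PySem.Int.ofChars? t).getD 0 ≤ 9
            · rw [if_pos h9]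
              by_cases hes : PySem.Chars.endswith t2 ['s'] = true
              · rw [if_pos hes, hset]
                simp [pvPlural, hes, hn0, h2, h9]
              · rw [if_neg hes, hset]
                simp [pvPlural, hes, hn0, h2, h9]
            · rw [if_neg h9]
              by_cases hes : PySem.Chars.endswith t2 ['s'] = true
              · rw [if_pos hes, hset]
                simp [pvPlural, hes, hn0, h2, h9]
              · rw [if_neg hes, hset]
                simp [pvPlural, hes, hn0, h2, h9]
        rw [hstep1]
        have hN1 : (done.length : Int) + 1
            < ((done.length + (t :: s1 :: t2 :: rest2).length : Nat) : Int) := by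
          push_cast; simp; omega
        rw [PySem.List.pyRange_one_cons hN1, List.foldl_cons]
        have hgets1 : PySem.List.pyGetD (done ++ t :: s1 :: pvPlural n0 t2 :: rest2)
            ((done.length : Int) + 1) [] = s1 := by
          rw [show (done.length : Int) + 1 = ((done.length + 1 : Nat) : Int) from by push_cast; ring]
          rw [PySem.List.pyGetD_natCast]
          simp [List.getD]
        have hstep2 : sursurungalStep (done ++ t :: s1 :: pvPlural n0 t2 :: rest2)
            ((done.length : Int) + 1) = done ++ t :: s1 :: pvPlural n0 t2 :: rest2 := by
          simp only [sursurungalStep]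
          rw [hgets1]
          rw [if_pos (by simp [not_digit_of_sep s1 hs1])]
        rw [hstep2]
        have hN2 : (done.length : Int) + 1 + 1
            < ((done.length + (t :: s1 :: t2 :: rest2).length : Nat) : Int) := by
          push_cast; simp; omega
        rw [PySem.List.pyRange_one_cons hN2, List.foldl_cons]
        have hgetX : PySem.List.pyGetD (done ++ t :: s1 :: pvPlural n0 t2 :: rest2)
            ((done.length : Int) + 1 + 1) [] = pvPlural n0 t2 := by
          rw [show (done.length : Int) + 1 + 1 = ((done.length + 2 : Nat) : Int) from by
                push_cast; ring]
          rw [PySem.List.pyGetD_natCast]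
          simp [List.getD]
        have hstep3 : sursurungalStep (done ++ t :: s1 :: pvPlural n0 t2 :: rest2)
            ((done.length : Int) + 1 + 1) = done ++ t :: s1 :: pvPlural n0 t2 :: rest2 := by
          simp only [sursurungalStep]
          rw [hgetX]
          rw [if_pos (by simp [plural_not_digit])]
        rw [hstep3]
        have hpend2 : pvPend rest2 false = false := by
          simpa [pvPend, hth, hs1, ht2, hnum] using hpend
        rw [show (done.length : Int) + 1 + 1 + 1
              = (((done ++ [t, s1, pvPlural n0 t2]).length : Nat) : Int) from by simp; ring,
            show ((done.length + (t :: s1 :: t2 :: rest2).length : Nat) : Int)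
              = (((done ++ [t, s1, pvPlural n0 t2]).length + rest2.length : Nat) : Int) from by
              push_cast; simp; omega,
            show done ++ t :: s1 :: pvPlural n0 t2 :: rest2
              = (done ++ [t, s1, pvPlural n0 t2]) ++ rest2 from by simp]
        rw [ih rest2.length (by simp at hlen; omega) rest2 (done ++ [t, s1, pvPlural n0 t2])
            (le_refl _) (fun x hx => hu x (by simp [hx])) hch.of_cons.of_cons.of_cons hpend2]
        have hproc : pvProc (t :: s1 :: t2 :: rest2) 0 []
            = [t, s1, pvPlural n0 t2] ++ pvProc rest2 0 [] := by
          calc pvProc (t :: s1 :: t2 :: rest2) 0 []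
              = pvProc (s1 :: t2 :: rest2) n0 [t] := by
                simp [pvProc, hth, hnum, ← hn0]
            _ = pvProc (t2 :: rest2) n0 [t, s1] := by
                simp [pvProc, hs1]
            _ = pvProc rest2 0 [t, s1, pvPlural n0 t2] := by
                simp [pvProc, ht2, show n0 ≠ 0 from by omega]
            _ = [t, s1, pvPlural n0 t2] ++ pvProc rest2 0 [] := pvProc_acc _ _ _
        rw [hproc]
        simp

-- ---- Pre_ ⇒ no raise ----

theorem pvPend_filter (ts : List (List Char)) : ∀ p,
    pvPend ts p = pvPend (ts.filter (fun t => !pvSep t.headI)) p := by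
  induction ts with
  | nil => intro p; rfl
  | cons t ts ih =>
    intro p
    by_cases hsept : pvSep t.headI = true
    · simp only [pvPend, List.filter_cons, hsept, if_pos]
      simp only [Bool.not_true, Bool.false_eq_true, if_false]
      exact ih p
    · have hf : pvSep t.headI = false := by simpa using hsept
      simp only [List.filter_cons, hf, Bool.not_false, if_true]
      simp only [pvPend, hf, Bool.false_eq_true, if_false]
      cases p
      · simp only [Bool.false_eq_true, if_false]
        exact ih (pvIsNum t)
      · simp only [if_true]
        exact ih false

theorem pvPend_append (as bs : List (List Char)) : ∀ p,
    pvPend (as ++ bs) p = pvPend bs (pvPend as p) := by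
  induction as with
  | nil => intro p; rfl
  | cons a as ih =>
    intro p
    simp only [List.cons_append, pvPend]
    split_ifs <;> apply ih

theorem pvPend_words_eq (ws : List (List Char)) (hw : ∀ t ∈ ws, pvSep t.headI = false) :
    pvPend ws false = decide ((ws.reverse.takeWhile pvIsNum).length % 2 = 1) := by
  induction ws using List.reverseRecOn with
  | nil => simp [pvPend]
  | append_singleton as w ih =>
    have hwas : ∀ t ∈ as, pvSep t.headI = false := fun t ht => hw t (by simp [ht])
    have hww : pvSep w.headI = false := hw w (by simp)
    rw [pvPend_append, ih hwas, List.reverse_append]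
    simp only [List.reverse_cons, List.reverse_nil, List.nil_append, List.singleton_append]
    cases hn : pvIsNum w
    · simp [pvPend, hww, hn]
    · by_cases hodd : (List.takeWhile pvIsNum as.reverse).length % 2 = 1
      · simp [pvPend, hww, hn, hodd]
        omega
      · simp [pvPend, hww, hn, hodd]
        omega

theorem pvWordsAux_sep_prefix (w : List Char) (hall : ∀ c ∈ w, pvSep c = true) :
    ∀ t, pvWordsAux (w ++ t) [] = pvWordsAux t [] := by
  induction w with
  | nil => intro t; rfl
  | cons c w ih =>
    intro t
    have hc : pvSep c = true := hall c (by simp)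
    simp only [List.cons_append, pvWordsAux, hc, if_true]
    exact ih (fun d hd => hall d (by simp [hd])) t

theorem pvWordsAux_word (t : List Char) : ∀ acc, acc ≠ [] →
    pvWordsAux t acc = (acc.reverse ++ t.takeWhile (fun d => !pvSep d))
      :: pvWordsAux (t.dropWhile (fun d => !pvSep d)) [] := by
  induction t with
  | nil => intro acc hacc; simp [pvWordsAux, hacc]
  | cons d t ih =>
    intro acc hacc
    by_cases hd : pvSep d = true
    · simp only [pvWordsAux, hd, if_true, if_neg hacc, List.takeWhile_cons, List.dropWhile_cons]
      simp [pvWordsAux, hd]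
    · have hdf : pvSep d = false := by simpa using hd
      simp only [pvWordsAux, hdf, List.takeWhile_cons, List.dropWhile_cons, Bool.false_eq_true,
        if_false, Bool.not_false, if_true]
      rw [ih (d :: acc) (by simp)]
      simp

theorem pvWords_eq_filter (s : List Char) :
    pvWords s = (pvRuns s).filter (fun t => !pvSep t.headI) := by
  induction hn : s.length using Nat.strong_induction_on generalizing s with
  | _ n ihn =>
    cases s with
    | nil => simp [pvWords, pvWordsAux, pvRuns]
    | cons c t =>
      subst hn
      by_cases hc : pvSep c = true
      · have hpred : (fun d => pvSep d == pvSep c) = (fun d => pvSep d) := by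
          funext d; rw [hc]; cases pvSep d <;> rfl
        have hsplit : t = t.takeWhile (fun d => pvSep d == pvSep c)
            ++ t.dropWhile (fun d => pvSep d == pvSep c) :=
          (List.takeWhile_append_dropWhile).symm
        have hall : ∀ x ∈ t.takeWhile (fun d => pvSep d == pvSep c), pvSep x = true := by
          intro x hx
          have := List.mem_takeWhile_imp hx
          rw [hc] at this
          simpa using this
        simp only [pvWords, pvWordsAux, hc, if_true]
        conv_lhs => rw [show pvWordsAux t ([] : List Char)
            = pvWords (t.dropWhile (fun d => pvSep d == pvSep c)) from by
          conv_lhs => rw [hsplit]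
          exact pvWordsAux_sep_prefix _ hall _]
        simp only [pvRuns, List.filter_cons, List.headI_cons, hc, Bool.not_true,
          Bool.false_eq_true, if_false]
        exact ihn _ (by have h1 := List.length_dropWhile_le (fun d => pvSep d == true) t
                        simp only [List.length_cons]
                        omega) _ rfl
      · have hcf : pvSep c = false := by simpa using hc
        have hpred : (fun d => pvSep d == pvSep c) = (fun d => !pvSep d) := by
          funext d; rw [hcf]; cases pvSep d <;> rfl
        simp only [pvWords, pvWordsAux, hcf, Bool.false_eq_true, if_false]
        rw [pvWordsAux_word t [c] (by simp)]
        simp only [pvRuns, List.filter_cons, List.headI_cons, hcf, Bool.not_false, if_true]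
        rw [show pvWordsAux (t.dropWhile (fun d => !pvSep d)) []
              = pvWords (t.dropWhile (fun d => !pvSep d)) from rfl]
        rw [ihn (t.dropWhile (fun d => !pvSep d)).length
            (by have := List.length_dropWhile_le (fun d => !pvSep d) t
                simp
                omega) _ rfl]
        simp

theorem pre_no_raise (s : List Char) (h : ((pvWords s).reverse.takeWhile pvIsNum).length % 2 = 0) :
    pvPend (pvRuns s) false = false := by
  rw [pvPend_filter (pvRuns s) false, ← pvWords_eq_filter s]
  rw [pvPend_words_eq (pvWords s) (by
    intro x hx
    rw [pvWords_eq_filter] at hx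
    have := List.of_mem_filter hx
    simpa using this)]
  simp
  omega

-- ===== VERDICT (by name: the statement is the Claim_ definition above) =====
theorem sursurungal_spec : Claim_equal_sursurungal := by
  intro txt hdom hpre
  unfold Spec_sursurungal
  unfold Pre_sursurungal at hpre
  have h1 : pvFinalize txt.toList (sursurungalLoop txt.toList txt.toList.length 0 0 [] [])
      = pvRuns txt.toList := by
    have h := loopA_spec txt.toList txt.toList.length 0 0 [] []
      (by omega) (by omega) (by omega) (by simp) (by simp) (by simp)
    simpa using h
  have hA : sursurungal txt = String.ofList (PySem.Chars.join []
      ((PySem.List.pyRange 0 (PySem.List.len (pvRuns txt.toList)) 1).foldl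
        sursurungalStep (pvRuns txt.toList))) := by
    show String.ofList (PySem.Chars.join []
      ((PySem.List.pyRange 0 (PySem.List.len
        (pvFinalize txt.toList (sursurungalLoop txt.toList txt.toList.length 0 0 [] []))) 1).foldl
        sursurungalStep
        (pvFinalize txt.toList (sursurungalLoop txt.toList txt.toList.length 0 0 [] [])))) = _
    rw [h1]
  have hB : sursurungal_alt txt
      = String.ofList (PySem.Chars.join [] (pvProc (pvRuns txt.toList) 0 [])) := by
    unfold sursurungal_alt
    rw [loopB_spec txt.toList txt.toList.length 0 0 [] (by omega)]
    simp
  have hphase : (PySem.List.pyRange 0 (PySem.List.len (pvRuns txt.toList)) 1).foldl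
      sursurungalStep (pvRuns txt.toList) = pvProc (pvRuns txt.toList) 0 [] := by
    have h := phase2_spec (pvRuns txt.toList).length (pvRuns txt.toList) []
      (le_refl _) (pvRuns_forall_uniform txt.toList) (pvRuns_chain txt.toList)
      (pre_no_raise txt.toList hpre)
    simpa [PySem.List.len_eq] using h
  rw [hA, hphase, hB]
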